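-- pv_equiv track=rewrite | github.com/lramirez89/proyectos_finalizados | materias_computacion/IntrCompBiologos/Talleres/Taller0/tallerEscoba.py | sumaListas
-- ===== SOURCE A (Python) =====
-- def sumaListas(lista):
-- 	suma= 0
-- 	i= 0
-- 	while i<len(lista):
-- 		if lista[i]!=10 and lista[i]!=11 and lista[i]!=12:
-- 			suma+= lista[i]
-- 		else:
-- 			suma+= lista[i]-2
-- 		i+=1
-- 	return suma
-- ===== SOURCE B (Python) =====
-- def sumaListas(lista):
--     return sum(lista) - 2 * sum(1 for x in lista if x in (10, 11, 12))
-- ===== Notes on version B (the rewrite author's own statement) =====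
-- stated objective: simpler
-- what changed: Replaced the index-driven while loop with per-element branching by a closed form: sum(lista) minus 2 times the count of elements in {10,11,12} (C-level builtins instead of Python-level indexing/branching).
import Mathlib
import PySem

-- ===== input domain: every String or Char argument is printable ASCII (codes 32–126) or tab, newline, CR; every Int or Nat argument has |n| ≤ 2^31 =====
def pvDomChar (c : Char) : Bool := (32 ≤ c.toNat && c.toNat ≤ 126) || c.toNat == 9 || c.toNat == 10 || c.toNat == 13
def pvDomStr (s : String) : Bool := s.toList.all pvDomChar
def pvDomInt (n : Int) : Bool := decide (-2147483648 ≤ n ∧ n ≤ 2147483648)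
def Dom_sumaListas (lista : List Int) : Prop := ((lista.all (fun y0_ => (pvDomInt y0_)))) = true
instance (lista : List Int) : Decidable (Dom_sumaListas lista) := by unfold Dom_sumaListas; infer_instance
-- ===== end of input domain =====

-- B computes the same value as a closed form: total sum minus 2 * count of elements in {10,11,12} (objective: simpler).
-- ===== PORT A =====
def sumaListasLoop (lista : List Int) (suma : Int) (i : Nat) : Int :=
  if h : i < lista.length then
    if lista[i] ≠ 10 ∧ lista[i] ≠ 11 ∧ lista[i] ≠ 12 then
      sumaListasLoop lista (suma + lista[i]) (i + 1)
    else
      sumaListasLoop lista (suma + (lista[i] - 2)) (i + 1)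
  else suma
termination_by lista.length - i

def sumaListas (lista : List Int) : Int := sumaListasLoop lista 0 0

-- ===== PORT B =====
def sumaListas_alt (lista : List Int) : Int :=
  lista.sum - 2 * ((lista.countP (fun x => x == 10 || x == 11 || x == 12) : Nat) : Int)

-- ===== PRECONDITION & SPEC =====
def Spec_sumaListas (lista : List Int) (out : Int) : Prop := out = sumaListas_alt lista
instance (lista : List Int) (out : Int) : Decidable (Spec_sumaListas lista out) := by unfold Spec_sumaListas; infer_instance

-- ===== CLAIM (what is proved, stated in full; the proofs are below) =====
def Claim_equal_sumaListas : Prop := ∀ (lista : List Int), Dom_sumaListas lista → Spec_sumaListas lista (sumaListas lista)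

-- ===== LEMMAS AND PROOFS =====

-- ===== VERDICT (by name: the statement is the Claim_ definition above) =====
lemma sumaListasLoop_eq (lista : List Int) (suma : Int) (i : Nat) :
    sumaListasLoop lista suma i =
      suma + (lista.drop i).sum
        - 2 * (((lista.drop i).countP (fun x => x == 10 || x == 11 || x == 12) : Nat) : Int) := by
  fun_induction sumaListasLoop lista suma i with
  | case1 suma i h hne ih =>
    rw [ih, List.drop_eq_getElem_cons h, List.sum_cons, List.countP_cons]
    obtain ⟨h10, h11, h12⟩ := hne
    simp only [h10, h11, h12, beq_iff_eq, Bool.or_eq_true,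
      or_self, ite_false]
    push_cast
    ring
  | case2 suma i h hne ih =>
    rw [ih, List.drop_eq_getElem_cons h, List.sum_cons, List.countP_cons]
    have hmem : (lista[i] == 10 || lista[i] == 11 || lista[i] == 12) = true := by
      by_contra hc
      simp only [Bool.or_eq_true, beq_iff_eq, not_or] at hc
      exact hne ⟨hc.1.1, hc.1.2, hc.2⟩
    simp only [hmem, if_true]
    push_cast
    ring
  | case3 suma i h =>
    have : lista.drop i = [] := List.drop_eq_nil_of_le (by omega)
    simp [this]

theorem sumaListas_spec : Claim_equal_sumaListas := by
  intro lista _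
  unfold Spec_sumaListas sumaListas sumaListas_alt
  rw [sumaListasLoop_eq]
  simp
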